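-- pv_equiv track=rewrite | github.com/AlexDyukov/10minutemail_list | 10minutemail_grabber.py | get_uniq_domains
-- ===== SOURCE A (Python) =====
-- def get_uniq_domains(list_of_domainsset):
--     result = set()
--     for domainsset in list_of_domainsset:
--         lods = list_of_domainsset.copy()
--         lods.remove(domainsset)
--         for domain in domainsset:
--             if all([domain not in ds for ds in lods]):
--                 result.add(domain)
--
--     return result
-- ===== SOURCE B (Python) =====
-- def get_uniq_domains(list_of_domainsset):
--     # Count, in one pass, how many input sets contain each domain (dedup within a set),
--     # then keep the domains contained in exactly one set.
--     counts = {}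
--     for domainsset in list_of_domainsset:
--         for domain in dict.fromkeys(domainsset):
--             counts[domain] = counts.get(domain, 0) + 1
--     return {domain
--             for domainsset in list_of_domainsset
--             for domain in domainsset
--             if counts[domain] == 1}
-- ===== Notes on version B (the rewrite author's own statement) =====
-- stated objective: faster
-- what changed: A re-scans, for every domain of every set, every other input set (after a per-set copy+remove of the whole list); B makes one counting pass recording how many input sets contain each domain, then one filtering pass keeping the domains counted exactly once.
import Mathlib
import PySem

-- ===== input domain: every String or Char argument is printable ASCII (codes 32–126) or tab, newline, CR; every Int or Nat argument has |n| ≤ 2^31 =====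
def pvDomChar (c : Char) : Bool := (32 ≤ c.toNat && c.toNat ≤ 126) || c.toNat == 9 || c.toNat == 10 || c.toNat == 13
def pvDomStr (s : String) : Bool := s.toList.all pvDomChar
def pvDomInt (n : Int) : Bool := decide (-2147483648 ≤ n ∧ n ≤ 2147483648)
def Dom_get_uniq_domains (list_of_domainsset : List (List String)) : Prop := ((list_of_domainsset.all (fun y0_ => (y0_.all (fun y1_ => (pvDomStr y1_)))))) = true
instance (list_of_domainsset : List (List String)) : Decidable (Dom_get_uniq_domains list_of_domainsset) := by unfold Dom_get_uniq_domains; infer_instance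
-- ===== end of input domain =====

-- B replaces A's per-set copy/remove and per-domain rescan of all other sets by one
-- counting pass (how many input sets contain each domain) plus one filtering pass.

-- ===== PORT A =====
def get_uniq_domains (list_of_domainsset : List (List String)) : List String :=
  list_of_domainsset.foldl (fun result domainsset =>
    -- lods = list_of_domainsset.copy(); lods.remove(domainsset) — inlined below where lods
    -- is used; domainsset ∈ list_of_domainsset, so remove? never signals ValueError
    domainsset.foldl (fun result domain =>
      if (((PySem.List.remove? list_of_domainsset domainsset).getD []).map
            (fun ds => !(ds.contains domain))).all id
      then PySem.Set.add result domain else result) result)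
    PySem.Set.empty

-- ===== PORT B =====
-- counts[domain] = number of input sets containing domain (dedup within a set, as Source B)
def pvCounts (list_of_domainsset : List (List String)) : PySem.Dict String Int :=
  list_of_domainsset.foldl (fun counts domainsset =>
    (PySem.List.dedup domainsset).foldl
      (fun counts domain => counts.insert domain (counts.getD domain 0 + 1)) counts)
    PySem.Dict.empty

def get_uniq_domains_alt (list_of_domainsset : List (List String)) : List String :=
  PySem.Set.ofList (list_of_domainsset.flatMap (fun domainsset =>
    domainsset.filter (fun domain => (pvCounts list_of_domainsset).getD domain 0 == 1)))

-- ===== PRECONDITION & SPEC =====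
def Spec_get_uniq_domains (list_of_domainsset : List (List String)) (out : List String) : Prop := out = get_uniq_domains_alt list_of_domainsset
instance (list_of_domainsset : List (List String)) (out : List String) : Decidable (Spec_get_uniq_domains list_of_domainsset out) := by unfold Spec_get_uniq_domains; infer_instance

-- ===== CLAIM (what is proved, stated in full; the proofs are below) =====
def Claim_equal_get_uniq_domains : Prop := ∀ (list_of_domainsset : List (List String)), Dom_get_uniq_domains list_of_domainsset → Spec_get_uniq_domains list_of_domainsset (get_uniq_domains list_of_domainsset)

-- ===== LEMMAS AND PROOFS =====

-- A's inner test "domain in no other set" equals "exactly one input set contains domain".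
theorem pv_cond_iff (L : List (List String)) (ds : List String) (d : String)
    (hds : ds ∈ L) (hd : d ∈ ds) :
    (∀ s ∈ L.erase ds, s.contains d = false) ↔
      L.countP (fun s => s.contains d) = 1 := by
  obtain ⟨l1, l2, -, hL, hE⟩ := List.exists_erase_eq hds
  rw [hE, hL]
  have hc : ds.contains d = true := by simpa using hd
  simp only [List.countP_append, List.countP_cons, hc, if_true]
  constructor
  · intro h
    have h1 : l1.countP (fun s => s.contains d) = 0 :=
      List.countP_eq_zero.mpr (fun s hs => by simpa using h s (List.mem_append_left _ hs))
    have h2 : l2.countP (fun s => s.contains d) = 0 :=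
      List.countP_eq_zero.mpr (fun s hs => by simpa using h s (List.mem_append_right _ hs))
    omega
  · intro h s hs
    have h1 : l1.countP (fun s => s.contains d) = 0 := by omega
    have h2 : l2.countP (fun s => s.contains d) = 0 := by omega
    rcases List.mem_append.mp hs with hs' | hs'
    · simpa using List.countP_eq_zero.mp h1 s hs'
    · simpa using List.countP_eq_zero.mp h2 s hs'

theorem pv_cond_eq (L : List (List String)) (ds : List String) (d : String)
    (hds : ds ∈ L) (hd : d ∈ ds) :
    ((L.erase ds).all (fun s => !(s.contains d)))
      = (L.countP (fun s => s.contains d) == 1) := by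
  rw [Bool.eq_iff_iff]
  simp only [List.all_eq_true, Bool.not_eq_true', beq_iff_eq]
  exact pv_cond_iff L ds d hds hd

-- The counting dict, one set pushed through: value at d grows by d's count in the set.
theorem pv_inner_count (xs : List String) (c : PySem.Dict String Int) (d : String) :
    ((xs.foldl (fun c x => c.insert x (c.getD x 0 + 1)) c).getD d 0)
      = c.getD d 0 + xs.count d := by
  induction xs generalizing c with
  | nil => simp
  | cons x xs ih =>
    simp only [List.foldl_cons, ih, PySem.Dict.getD_insert, List.count_cons]
    by_cases h : d = x
    · subst h
      simp only [BEq.rfl, if_true]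
      push_cast
      ring
    · rw [if_neg h]
      simp [Ne.symm h]

-- The full counting dict: value at d = number of input sets containing d.
theorem pv_counts_getD (L : List (List String)) (c : PySem.Dict String Int) (d : String) :
    ((L.foldl (fun c ds => (PySem.List.dedup ds).foldl
        (fun c x => c.insert x (c.getD x 0 + 1)) c) c).getD d 0)
      = c.getD d 0 + (L.countP (fun s => s.contains d) : Int) := by
  induction L generalizing c with
  | nil => simp
  | cons ds L ih =>
    simp only [List.foldl_cons, ih, pv_inner_count, List.countP_cons]
    have hcnt : (PySem.List.dedup ds).count d = if ds.contains d = true then 1 else 0 := by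
      by_cases h : d ∈ ds
      · rw [if_pos (by simpa using h)]
        exact List.count_eq_one_of_mem (PySem.List.nodup_dedup ds)
          ((PySem.List.mem_dedup ds d).mpr h)
      · rw [if_neg (by simpa using h)]
        exact List.count_eq_zero.mpr (by simpa [PySem.List.mem_dedup] using h)
    rw [hcnt]
    by_cases h : ds.contains d = true
    · rw [if_pos h]
      push_cast
      ring
    · rw [if_neg h]
      push_cast
      ring

-- Conditional adding along a list = adding the filtered list.
theorem pv_fold_if_add (xs : List String) (p : String → Bool) (s : PySem.Set String) :
    xs.foldl (fun s x => if p x then PySem.Set.add s x else s) s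
      = (xs.filter p).foldl PySem.Set.add s := by
  induction xs generalizing s with
  | nil => rfl
  | cons x xs ih =>
    simp only [List.foldl_cons, List.filter_cons]
    by_cases h : p x <;> simp [h, ih]

-- Nested fold of adds = fold of adds over the flattened list.
theorem pv_fold_flat (L : List (List String)) (g : List String → List String)
    (s : PySem.Set String) :
    L.foldl (fun s ds => (g ds).foldl PySem.Set.add s) s
      = (L.flatMap g).foldl PySem.Set.add s := by
  induction L generalizing s with
  | nil => rfl
  | cons ds L ih => simp [List.foldl_append, ih]

theorem pv_counts_beq (L : List (List String)) (d : String) :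
    ((pvCounts L).getD d 0 == 1) = (L.countP (fun s => s.contains d) == 1) := by
  have h : (pvCounts L).getD d 0 = (L.countP (fun s => s.contains d) : Int) := by
    unfold pvCounts
    rw [pv_counts_getD]
    simp
  rw [h, Bool.eq_iff_iff]
  simp only [beq_iff_eq]
  constructor <;> intro h' <;> exact_mod_cast h'

theorem get_uniq_domains_eq (L : List (List String)) :
    get_uniq_domains L = get_uniq_domains_alt L := by
  unfold get_uniq_domains get_uniq_domains_alt
  simp only [pv_counts_beq]
  rw [PySem.Set.ofList_eq_foldl, ← pv_fold_flat]
  have hempty : (PySem.Set.empty : PySem.Set String) = [] := rfl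
  rw [hempty]
  apply PySem.List.foldl_congr_mem
  intro acc ds hds
  rw [← pv_fold_if_add]
  apply PySem.List.foldl_congr_mem
  intro acc' d hd
  have hrem : (PySem.List.remove? L ds).getD [] = L.erase ds := by
    rw [PySem.List.remove?_eq_some_erase L ds hds]
    rfl
  rw [hrem]
  have hcond : (((L.erase ds).map (fun s => !(s.contains d))).all id)
      = (L.countP (fun s => s.contains d) == 1) := by
    rw [← pv_cond_eq L ds d hds hd]
    simp [List.all_map]
  rw [hcond]

-- ===== VERDICT (by name: the statement is the Claim_ definition above) =====
theorem get_uniq_domains_spec : Claim_equal_get_uniq_domains := by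
  intro L _
  exact get_uniq_domains_eq L
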